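-- pv_equiv track=rewrite | github.com/GameMaker2k/PyWWW-Get | dnsd.py | _choose_zone_chain
-- ===== SOURCE A (Python) =====
-- DNSSEC_MAX_LABELS = 20
--
-- def _dnsname_norm(s):
--     return (s or "").strip().lower().rstrip(".")
--
-- def _choose_zone_chain(qname):
--     """
--     qname: "www.google.com" -> [".", "com.", "google.com."]
--     (very simplified)
--     """
--     n = _dnsname_norm(qname)
--     if not n:
--         return ["."]
--     labels = n.split(".")
--     chain = ["."]
--     # build from TLD upward
--     cur = ""
--     for i in range(len(labels) - 1, -1, -1):
--         cur = labels[i] if cur == "" else (labels[i] + "." + cur)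
--         chain.append(cur + ".")
--         if len(chain) > DNSSEC_MAX_LABELS:
--             break
--     # keep unique in order
--     out = []
--     for z in chain:
--         if z not in out:
--             out.append(z)
--     return out
-- ===== SOURCE B (Python) =====
-- DNSSEC_MAX_LABELS = 20
--
-- def _choose_zone_chain(qname):
--     n = (qname or "").strip().lower().rstrip(".")
--     if not n:
--         return ["."]
--     labels = n.split(".")
--     suffixes = [".".join(labels[i:]) + "." for i in range(len(labels))]
--     chain = ["."] + suffixes[::-1][:DNSSEC_MAX_LABELS]
--     return list(dict.fromkeys(chain))
-- ===== Notes on version B (the rewrite author's own statement) =====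
-- stated objective: simpler
-- what changed: Drops the stateful suffix accumulator with its break and the hand-written membership dedup loop: each zone suffix is computed independently by joining a slice of the label list in a comprehension, the chain is capped by reversing and slicing to DNSSEC_MAX_LABELS instead of a length-test break, and the ordered dedup is dict.fromkeys.
import Mathlib
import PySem

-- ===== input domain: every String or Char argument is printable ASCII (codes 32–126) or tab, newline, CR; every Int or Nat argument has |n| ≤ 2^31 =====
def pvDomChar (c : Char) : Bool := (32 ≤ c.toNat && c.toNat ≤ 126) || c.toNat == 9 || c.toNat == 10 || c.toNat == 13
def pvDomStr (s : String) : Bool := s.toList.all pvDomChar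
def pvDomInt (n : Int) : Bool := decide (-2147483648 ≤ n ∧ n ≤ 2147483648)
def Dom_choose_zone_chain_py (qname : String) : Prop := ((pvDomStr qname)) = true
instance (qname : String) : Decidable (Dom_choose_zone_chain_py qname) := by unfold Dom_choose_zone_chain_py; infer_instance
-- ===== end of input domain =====

-- B replaces A's stateful suffix accumulator + break and its membership dedup loop by a
-- direct slice-join comprehension, a reversed slice capped with [:20], and dict.fromkeys
-- (objective: simpler; same asymptotic cost).


-- ===== PORT A =====
-- Python str.rstrip(".") ported by hand (PySem has no per-character rstrip):
-- drop the trailing '.' characters — exact for any string.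
def rstripDots (s : List Char) : List Char := (s.reverse.dropWhile (· == '.')).reverse

-- _dnsname_norm: (s or "").strip().lower().rstrip(".")  ('s or ""' is the identity on str)
def dnsnameNorm (s : String) : List Char :=
  rstripDots (PySem.Chars.lower (PySem.Chars.strip s.toList))

-- 'for i in range(len(labels)-1,-1,-1): …' with accumulator cur and the len(chain) > 20 break,
-- as the structural recursion over labels reversed (labels[i] back to front).
def aZoneLoop : List (List Char) → List Char → List String → List String
  | [], _, chain => chain
  | l :: rest, cur, chain =>
    let cur' := if cur = [] then l else l ++ '.' :: cur
    let chain' := chain ++ [String.mk (cur' ++ ['.'])]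
    if chain'.length > 20 then chain' else aZoneLoop rest cur' chain'

-- 'out = []; for z in chain: if z not in out: out.append(z)'
def aUniq (chain : List String) : List String :=
  chain.foldl (fun out z => if out.contains z then out else out ++ [z]) []

def choose_zone_chain_py (qname : String) : List String :=
  let n := dnsnameNorm qname
  if n = [] then ["."]
  else
    let labels := PySem.Chars.splitOn n ['.']
    aUniq (aZoneLoop labels.reverse [] ["."])

-- ===== PORT B =====
-- '.'.join(labels[i:]) + '.'
def bSuffix (labels : List (List Char)) (i : Int) : String :=
  String.mk (PySem.Chars.join ['.'] (PySem.List.slice labels (some i) none) ++ ['.'])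

def choose_zone_chain_py_alt (qname : String) : List String :=
  let n := dnsnameNorm qname
  if n = [] then ["."]
  else
    let labels := PySem.Chars.splitOn n ['.']
    let suffixes := (PySem.List.pyRange 0 labels.length 1).map (bSuffix labels)
    let chain := ["."] ++ PySem.List.slice
      ((PySem.List.slice? suffixes none none (-1)).getD []) none (some 20)
    PySem.List.dedup chain

-- ===== PRECONDITION & SPEC =====
def Spec_choose_zone_chain_py (qname : String) (out : List String) : Prop := out = choose_zone_chain_py_alt qname
instance (qname : String) (out : List String) : Decidable (Spec_choose_zone_chain_py qname out) := by unfold Spec_choose_zone_chain_py; infer_instance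

-- ===== CLAIM (what is proved, stated in full; the proofs are below) =====
def Claim_equal_choose_zone_chain_py : Prop := ∀ (qname : String), Dom_choose_zone_chain_py qname → Spec_choose_zone_chain_py qname (choose_zone_chain_py qname)

-- ===== LEMMAS AND PROOFS =====

-- The suffix strings A's loop appends, starting from already-consumed labels `pre` (front first).
def sufA : List (List Char) → List (List Char) → List String
  | [], _ => []
  | l :: rest, pre =>
    String.mk (PySem.Chars.join ['.'] (l :: pre) ++ ['.']) :: sufA rest (l :: pre)

-- A's loop, once cur is a nonempty join, appends sufA capped at 21 total chain elements.
theorem aZoneLoop_spec (ls : List (List Char)) : ∀ (pre : List (List Char)) (chain : List String),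
    pre ≠ [] → PySem.Chars.join ['.'] pre ≠ [] → chain.length ≤ 20 →
    aZoneLoop ls (PySem.Chars.join ['.'] pre) chain
      = chain ++ (sufA ls pre).take (21 - chain.length) := by
  induction ls with
  | nil => intro pre chain _ _ _; simp [aZoneLoop, sufA]
  | cons l rest ih =>
    intro pre chain hpre hj hlen
    obtain ⟨p, ps, rfl⟩ := List.exists_cons_of_ne_nil hpre
    rw [aZoneLoop]
    simp only [if_neg hj]
    have hcur : l ++ '.' :: PySem.Chars.join ['.'] (p :: ps) = PySem.Chars.join ['.'] (l :: p :: ps) := by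
      rw [PySem.Chars.join_cons_cons]
      simp
    rw [hcur]
    by_cases hb : chain.length = 20
    · rw [if_pos (by simp [hb])]
      rw [sufA, hb]
      simp
    · rw [if_neg (by simp; omega)]
      rw [ih (l :: p :: ps) _ (List.cons_ne_nil _ _)
            (by rw [← hcur]; simp) (by simp; omega)]
      rw [sufA]
      have h21 : 21 - chain.length = (21 - (chain.length + 1)) + 1 := by omega
      rw [h21, List.take_succ_cons]
      simp

-- sufA as the reversed list of direct slice-joins.
theorem sufA_eq (ls : List (List Char)) : ∀ (pre : List (List Char)),
    sufA ls pre
      = ((List.range ls.length).map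
          (fun k => String.mk (PySem.Chars.join ['.'] (ls.reverse.drop k ++ pre) ++ ['.']))).reverse := by
  induction ls with
  | nil => intro pre; simp [sufA]
  | cons l rest ih =>
    intro pre
    rw [sufA, List.length_cons, List.range_succ, List.map_append, List.reverse_append]
    have htail : List.map
        (fun k => String.mk (PySem.Chars.join ['.'] ((l :: rest).reverse.drop k ++ pre) ++ ['.']))
        (List.range rest.length)
        = List.map
        (fun k => String.mk (PySem.Chars.join ['.'] (rest.reverse.drop k ++ (l :: pre)) ++ ['.']))
        (List.range rest.length) := by
      apply List.map_congr_left
      intro k hk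
      rw [List.mem_range] at hk
      rw [List.reverse_cons, List.drop_append_of_le_length (by simp; omega), List.append_assoc]
      simp
    rw [htail, ← ih (l :: pre)]
    simp

-- splitOn by '.' of a nonempty string not ending in '.' has a nonempty last piece.
theorem splitOn_go_last (fuel : Nat) : ∀ (l cur : List Char) (acc : List (List Char)),
    l.length < fuel → (if l = [] then cur ≠ [] else l.getLast? ≠ some '.') →
    ∃ p, (PySem.Chars.splitOn.go ['.'] fuel l cur acc).getLast? = some p ∧ p ≠ [] := by
  induction fuel with
  | zero => intro l cur acc h; omega
  | succ f ih =>
    intro l cur acc hlen hcond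
    match l with
    | [] =>
      simp only [if_pos] at hcond
      refine ⟨cur.reverse, ?_, by simpa using hcond⟩
      simp [PySem.Chars.splitOn.go]
    | c :: rest =>
      simp only [if_neg (List.cons_ne_nil c rest)] at hcond
      rw [PySem.Chars.splitOn.go]
      by_cases hc : c = '.'
      · subst hc
        have hpre : List.isPrefixOf ['.'] ('.' :: rest) = true := by
          simp [List.isPrefixOf]
        rw [if_pos hpre]
        have hrest : rest ≠ [] := by
          intro h0; subst h0; simp at hcond
        have hdrop : List.drop (['.'] : List Char).length ('.' :: rest) = rest := by simp
        rw [hdrop]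
        refine ih rest [] _ (by simp at hlen; omega) ?_
        rw [if_neg hrest]
        obtain ⟨r, rs, rfl⟩ := List.exists_cons_of_ne_nil hrest
        rwa [List.getLast?_cons_cons] at hcond
      · have hpre : List.isPrefixOf ['.'] (c :: rest) = false := by
          simp [List.isPrefixOf]
          exact fun h => hc h.symm
        rw [if_neg (by simp [hpre])]
        refine ih rest (c :: cur) acc (by simp at hlen; omega) ?_
        by_cases hrest : rest = []
        · subst hrest; simp
        · rw [if_neg hrest]
          obtain ⟨r, rs, rfl⟩ := List.exists_cons_of_ne_nil hrest
          rwa [List.getLast?_cons_cons] at hcond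

theorem pyRange_zero_len (n : Nat) : ∀ (a : Nat),
    PySem.List.pyRange a (a + n) 1 = (List.range n).map (fun k => ((a + k : Nat) : Int)) := by
  induction n with
  | zero => intro a; simp [PySem.List.pyRange]
  | succ m ih =>
    intro a
    rw [PySem.List.pyRange_one_cons (by exact_mod_cast Nat.lt_add_of_pos_right (Nat.succ_pos m))]
    have : ((a : Int) + 1) = ((a + 1 : Nat) : Int) := by push_cast; ring
    rw [this]
    have h2 : ((a : Int) + (m + 1 : Nat)) = ((a + 1 : Nat) : Int) + (m : Nat) := by push_cast; ring
    rw [h2, ih (a + 1)]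
    rw [List.range_succ_eq_map]
    simp [List.map_map, Function.comp]
    intro k _; ring

theorem aUniq_eq_dedup (chain : List String) : aUniq chain = PySem.List.dedup chain := by
  rw [PySem.List.dedup_eq_ofList]
  rfl

-- ===== VERDICT (by name: the statement is the Claim_ definition above) =====
theorem choose_zone_chain_py_spec : Claim_equal_choose_zone_chain_py := by
  intro qname _
  unfold Spec_choose_zone_chain_py choose_zone_chain_py choose_zone_chain_py_alt
  by_cases hn : dnsnameNorm qname = []
  · simp [hn]
  · simp only [if_neg hn]
    -- the normalized name does not end in '.'
    have hlastchar : (dnsnameNorm qname).getLast? ≠ some '.' := by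
      unfold dnsnameNorm rstripDots at hn ⊢
      rw [List.getLast?_reverse]
      intro hsome
      have hne : (PySem.Chars.lower (PySem.Chars.strip qname.toList)).reverse.dropWhile (· == '.') ≠ [] := by
        intro h0; rw [h0] at hn; simp at hn
      rw [List.head?_eq_some_head hne] at hsome
      have := List.head_dropWhile_not (· == '.') hne
      rw [Option.some_inj.mp hsome] at this
      simp at this
    -- the last label is nonempty
    obtain ⟨p, hp, hpne⟩ :
        ∃ p, (PySem.Chars.splitOn (dnsnameNorm qname) ['.']).getLast? = some p ∧ p ≠ [] := by
      unfold PySem.Chars.splitOn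
      exact splitOn_go_last ((dnsnameNorm qname).length + 1) (dnsnameNorm qname) [] []
        (Nat.lt_succ_self _) (by rw [if_neg hn]; exact hlastchar)
    obtain ⟨front, hfront⟩ := List.getLast?_eq_some_iff.mp hp
    rw [hfront]
    have hrev : (front ++ [p]).reverse = p :: front.reverse := by simp
    -- A's chain
    have hA : aZoneLoop (front ++ [p]).reverse [] ["."]
        = [".", String.mk (p ++ ['.'])] ++ (sufA front.reverse [p]).take 19 := by
      rw [hrev, aZoneLoop]
      simp only [reduceIte, List.length_append]
      have hp' : p = PySem.Chars.join ['.'] [p] := (PySem.Chars.join_singleton _ _).symm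
      rw [show ([("." : String)] ++ [String.mk (p ++ ['.'])]) = [".", String.mk (p ++ ['.'])] from rfl]
      rw [if_neg (by simp)]
      conv_lhs => rw [hp']
      rw [aZoneLoop_spec front.reverse [p] _ (List.cons_ne_nil _ _)
            (by rw [← hp']; exact hpne) (by simp)]
      norm_num
    -- B's chain
    have hsuf : (PySem.List.pyRange 0 (front ++ [p]).length 1).map (bSuffix (front ++ [p]))
        = (List.range (front.length + 1)).map
            (fun k => String.mk (PySem.Chars.join ['.'] ((front ++ [p]).drop k) ++ ['.'])) := by
      have h0 := pyRange_zero_len (front ++ [p]).length 0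
      simp only [Nat.cast_zero, zero_add] at h0
      rw [h0, List.map_map, List.length_append, List.length_cons, List.length_nil]
      apply List.map_congr_left
      intro k _
      simp only [Function.comp_apply, bSuffix]
      rw [PySem.List.slice_from_natCast]
    have hlastsuf : (front ++ [p]).drop front.length = [p] := by
      rw [List.drop_append_of_le_length (by simp)]
      simp
    have hB : ["."] ++ PySem.List.slice
          ((PySem.List.slice? ((PySem.List.pyRange 0 (front ++ [p]).length 1).map (bSuffix (front ++ [p]))) none none (-1)).getD [])
          none (some 20)
        = [".", String.mk (p ++ ['.'])] ++ (sufA front.reverse [p]).take 19 := by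
      rw [hsuf, PySem.List.slice?_none_none_neg_one, Option.getD_some]
      rw [show ((20 : Int)) = ((20 : Nat) : Int) by norm_num, PySem.List.slice_to_natCast]
      rw [List.range_succ, List.map_append, List.reverse_append]
      simp only [List.map_cons, List.map_nil, List.reverse_cons, List.reverse_nil, List.nil_append,
        List.singleton_append]
      rw [hlastsuf, PySem.Chars.join_singleton,
        show (20 : Nat) = 19 + 1 from rfl, List.take_succ_cons]
      rw [sufA_eq front.reverse [p]]
      simp only [List.reverse_reverse, List.length_reverse]
      have : List.map (fun k => String.mk (PySem.Chars.join ['.'] ((front ++ [p]).drop k) ++ ['.'])) (List.range front.length)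
          = List.map (fun k => String.mk (PySem.Chars.join ['.'] (front.drop k ++ [p]) ++ ['.'])) (List.range front.length) := by
        apply List.map_congr_left
        intro k hk
        rw [List.mem_range] at hk
        rw [List.drop_append_of_le_length (by omega)]
      rw [this]
      rfl
    rw [hA, ← hB, aUniq_eq_dedup]
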